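-- pv_equiv track=rewrite | github.com/AIMedic-dev/OpenEvidence | AgenteOpenEvidence.py | _classify_evidence_level
-- ===== SOURCE A (Python) =====
-- from typing import List, Dict, Any, Optional
--
-- def _classify_evidence_level(relevant_docs: List[Dict[str, Any]]) -> str:
--     """Clasificar nivel de evidencia basado en fuentes"""
--     if not relevant_docs:
--         return "No Evidence"
--
--     source_types = []
--     for doc in relevant_docs:
--         source = doc['source'].lower()
--         if 'pubmed' in source or 'nejm' in source or 'jama' in source or 'lancet' in source:
--             source_types.append('high_impact')
--         elif 'bmj' in source or 'nature' in source or 'cell' in source: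
--             source_types.append('peer_reviewed')
--         elif 'cochrane' in source:
--             source_types.append('systematic_review')
--         elif 'who' in source or 'cdc' in source or 'fda' in source:
--             source_types.append('regulatory')
--         else:
--             source_types.append('general')
--
--     if 'systematic_review' in source_types:
--         return "Level I (Systematic Review/Meta-analysis)"
--     elif source_types.count('high_impact') >= 2:
--         return "Level II (High-Quality RCT/Cohort)"
--     elif 'peer_reviewed' in source_types:
--         return "Level III (Peer-Reviewed Studies)"
--     elif 'regulatory' in source_types:
--         return "Level IV (Guidelines/Expert Opinion)"
--     else:
--         return "Level V (Limited Evidence)"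
-- ===== SOURCE B (Python) =====
-- HIGH_IMPACT = ('pubmed', 'nejm', 'jama', 'lancet')
-- PEER_REVIEWED = ('bmj', 'nature', 'cell')
-- REGULATORY = ('who', 'cdc', 'fda')
--
--
-- def _hits(source, keywords):
--     return any(k in source for k in keywords)
--
--
-- def _classify_evidence_level(relevant_docs):
--     """Level-major decomposition: instead of classifying each doc into a label and
--     rescanning the labels, test each evidence level directly as a predicate over
--     the lowered sources, in priority order."""
--     if not relevant_docs:
--         return "No Evidence"
--
--     sources = [doc['source'].lower() for doc in relevant_docs]
--
--     # A doc counts as systematic only if no higher-priority keyword group claims it.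
--     if any('cochrane' in s and not _hits(s, HIGH_IMPACT) and not _hits(s, PEER_REVIEWED)
--            for s in sources):
--         return "Level I (Systematic Review/Meta-analysis)"
--     if sum(1 for s in sources if _hits(s, HIGH_IMPACT)) >= 2:
--         return "Level II (High-Quality RCT/Cohort)"
--     if any(_hits(s, PEER_REVIEWED) and not _hits(s, HIGH_IMPACT) for s in sources):
--         return "Level III (Peer-Reviewed Studies)"
--     if any(_hits(s, REGULATORY) and not _hits(s, HIGH_IMPACT)
--            and not _hits(s, PEER_REVIEWED) and 'cochrane' not in s
--            for s in sources):
--         return "Level IV (Guidelines/Expert Opinion)"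
--     return "Level V (Limited Evidence)"
-- ===== Notes on version B (the rewrite author's own statement) =====
-- stated objective: alternative
-- what changed: B inverts the loop structure from doc-major to level-major: A classifies every doc into a label list and rescans it per level, while B never builds labels and instead evaluates each evidence level as a direct predicate/count over the lowered sources (with explicit negations of higher-priority keyword groups replacing A's elif chain), short-circuiting in priority order.
import Mathlib
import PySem

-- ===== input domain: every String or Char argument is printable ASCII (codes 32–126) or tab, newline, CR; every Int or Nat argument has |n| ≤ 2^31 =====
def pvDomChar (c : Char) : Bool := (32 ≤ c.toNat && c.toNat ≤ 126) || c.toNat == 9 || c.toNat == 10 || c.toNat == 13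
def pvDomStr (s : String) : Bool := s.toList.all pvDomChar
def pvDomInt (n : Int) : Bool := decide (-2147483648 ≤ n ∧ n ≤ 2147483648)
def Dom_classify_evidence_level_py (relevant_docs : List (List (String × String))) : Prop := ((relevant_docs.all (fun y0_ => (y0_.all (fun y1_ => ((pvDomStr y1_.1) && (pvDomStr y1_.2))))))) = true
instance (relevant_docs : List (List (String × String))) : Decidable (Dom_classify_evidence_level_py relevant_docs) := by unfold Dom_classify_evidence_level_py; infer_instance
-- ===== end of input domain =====

-- B inverts A's doc-major label-list construction into a level-major chain of direct predicates/counts over the lowered sources; same values, different decomposition.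

-- ===== PORT A =====
-- doc['source'] : first-match lookup; Pre_ guarantees the key is present, so getD "" is never the taken branch inside Pre_.
def pvSourceOf (doc : List (String × String)) : String :=
  PySem.Str.lower (((PySem.Dict.mk doc).get? "source").getD "")

-- the body of A's classification loop for one doc (branches in A's order), on the lowered source
def pvLabelOfSrc (source : String) : String :=
  if PySem.Str.isIn "pubmed" source || PySem.Str.isIn "nejm" source || PySem.Str.isIn "jama" source || PySem.Str.isIn "lancet" source then
    "high_impact"
  else if PySem.Str.isIn "bmj" source || PySem.Str.isIn "nature" source || PySem.Str.isIn "cell" source then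
    "peer_reviewed"
  else if PySem.Str.isIn "cochrane" source then
    "systematic_review"
  else if PySem.Str.isIn "who" source || PySem.Str.isIn "cdc" source || PySem.Str.isIn "fda" source then
    "regulatory"
  else
    "general"

def pvLabelOf (doc : List (String × String)) : String := pvLabelOfSrc (pvSourceOf doc)

def classify_evidence_level_py (relevant_docs : List (List (String × String))) : String :=
  if relevant_docs = [] then "No Evidence"
  else
    let source_types : List String :=
      relevant_docs.foldl (fun acc doc => acc ++ [pvLabelOf doc]) []
    if "systematic_review" ∈ source_types then "Level I (Systematic Review/Meta-analysis)"
    else if PySem.List.count source_types "high_impact" ≥ 2 then "Level II (High-Quality RCT/Cohort)"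
    else if "peer_reviewed" ∈ source_types then "Level III (Peer-Reviewed Studies)"
    else if "regulatory" ∈ source_types then "Level IV (Guidelines/Expert Opinion)"
    else "Level V (Limited Evidence)"

-- ===== PORT B =====
def pvHits (s : String) (kws : List String) : Bool := kws.any (fun k => PySem.Str.isIn k s)

def pvHI : List String := ["pubmed", "nejm", "jama", "lancet"]
def pvPR : List String := ["bmj", "nature", "cell"]
def pvREG : List String := ["who", "cdc", "fda"]

def classify_evidence_level_py_alt (relevant_docs : List (List (String × String))) : String :=
  if relevant_docs = [] then "No Evidence"
  else
    let sources := relevant_docs.map pvSourceOf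
    if sources.any (fun s => PySem.Str.isIn "cochrane" s && !pvHits s pvHI && !pvHits s pvPR) then
      "Level I (Systematic Review/Meta-analysis)"
    else if sources.countP (fun s => pvHits s pvHI) ≥ 2 then
      "Level II (High-Quality RCT/Cohort)"
    else if sources.any (fun s => pvHits s pvPR && !pvHits s pvHI) then
      "Level III (Peer-Reviewed Studies)"
    else if sources.any (fun s => pvHits s pvREG && !pvHits s pvHI && !pvHits s pvPR && !PySem.Str.isIn "cochrane" s) then
      "Level IV (Guidelines/Expert Opinion)"
    else "Level V (Limited Evidence)"

-- ===== PRECONDITION & SPEC =====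
-- Pre_ excludes only docs without a 'source' key, on which A raises KeyError.
def Pre_classify_evidence_level_py (relevant_docs : List (List (String × String))) : Prop :=
  ∀ doc ∈ relevant_docs, "source" ∈ doc.map Prod.fst

instance (relevant_docs : List (List (String × String))) : Decidable (Pre_classify_evidence_level_py relevant_docs) := by
  unfold Pre_classify_evidence_level_py; infer_instance

def pvWitness_classify_evidence_level_py : (List (List (String × String))) :=
  [[("source", "PubMed 2020")], [("source", "Cochrane review")]]

def Spec_classify_evidence_level_py (relevant_docs : List (List (String × String))) (out : String) : Prop := out = classify_evidence_level_py_alt relevant_docs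
instance (relevant_docs : List (List (String × String))) (out : String) : Decidable (Spec_classify_evidence_level_py relevant_docs out) := by unfold Spec_classify_evidence_level_py; infer_instance

-- ===== CLAIM (what is proved, stated in full; the proofs are below) =====
def Claim_equal_classify_evidence_level_py : Prop := ∀ (relevant_docs : List (List (String × String))), Dom_classify_evidence_level_py relevant_docs → Pre_classify_evidence_level_py relevant_docs → Spec_classify_evidence_level_py relevant_docs (classify_evidence_level_py relevant_docs)

-- ===== LEMMAS AND PROOFS =====

-- per-source characterisation of A's labels by B's keyword-group predicates
lemma pvLab_sys (s : String) :
    decide (pvLabelOfSrc s = "systematic_review")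
      = (PySem.Str.isIn "cochrane" s && !pvHits s pvHI && !pvHits s pvPR) := by
  simp only [pvLabelOfSrc, pvHits, pvHI, pvPR, List.any_cons, List.any_nil, Bool.or_false]
  split_ifs <;> (try simp_all) <;> (try (intros; simp_all)) <;> tauto

lemma pvLab_hi (s : String) :
    decide (pvLabelOfSrc s = "high_impact") = pvHits s pvHI := by
  simp only [pvLabelOfSrc, pvHits, pvHI, List.any_cons, List.any_nil, Bool.or_false]
  split_ifs <;> (try simp_all) <;> tauto

lemma pvLab_pr (s : String) :
    decide (pvLabelOfSrc s = "peer_reviewed") = (pvHits s pvPR && !pvHits s pvHI) := by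
  simp only [pvLabelOfSrc, pvHits, pvHI, pvPR, List.any_cons, List.any_nil, Bool.or_false]
  split_ifs <;> (try simp_all) <;> (try (intros; simp_all)) <;> tauto

lemma pvLab_reg (s : String) :
    decide (pvLabelOfSrc s = "regulatory")
      = (pvHits s pvREG && !pvHits s pvHI && !pvHits s pvPR && !PySem.Str.isIn "cochrane" s) := by
  simp only [pvLabelOfSrc, pvHits, pvHI, pvPR, pvREG, List.any_cons, List.any_nil, Bool.or_false]
  split_ifs <;> (try simp_all) <;> (try (intros; simp_all)) <;> tauto

lemma pvA_list_eq_map (docs : List (List (String × String))) :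
    docs.foldl (fun acc doc => acc ++ [pvLabelOf doc]) [] = docs.map pvLabelOf := by
  have h : ∀ (acc : List String), docs.foldl (fun acc doc => acc ++ [pvLabelOf doc]) acc = acc ++ docs.map pvLabelOf := by
    induction docs with
    | nil => simp
    | cons d ds ih => intro acc; simp [ih]
  simpa using h []

lemma pvMem_label (docs : List (List (String × String))) (lab : String) :
    decide (lab ∈ docs.map pvLabelOf)
      = (docs.map pvSourceOf).any (fun s => decide (pvLabelOfSrc s = lab)) := by
  induction docs with
  | nil => simp
  | cons d ds ih =>
    simp only [List.map_cons, List.any_cons, List.mem_cons, ← ih, pvLabelOf]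
    by_cases h : pvLabelOfSrc (pvSourceOf d) = lab
    · simp [h]
    · simp [h, Ne.symm h]

lemma pvCount_label (docs : List (List (String × String))) :
    List.count "high_impact" (docs.map pvLabelOf)
      = (docs.map pvSourceOf).countP (fun s => decide (pvLabelOfSrc s = "high_impact")) := by
  induction docs with
  | nil => simp
  | cons d ds ih =>
    simp only [List.map_cons, List.count_cons, List.countP_cons, ih, pvLabelOf]
    by_cases h : pvLabelOfSrc (pvSourceOf d) = "high_impact"
    · simp [h]
    · simp [h]

-- each of B's level conditions, in the port's exact syntax, equals A's condition
lemma pvCond_sys (docs : List (List (String × String))) :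
    decide ("systematic_review" ∈ docs.map pvLabelOf)
      = (docs.map pvSourceOf).any (fun s => PySem.Str.isIn "cochrane" s && !pvHits s pvHI && !pvHits s pvPR) := by
  rw [pvMem_label]; congr 1; funext s; exact pvLab_sys s

lemma pvCond_pr (docs : List (List (String × String))) :
    decide ("peer_reviewed" ∈ docs.map pvLabelOf)
      = (docs.map pvSourceOf).any (fun s => pvHits s pvPR && !pvHits s pvHI) := by
  rw [pvMem_label]; congr 1; funext s; exact pvLab_pr s

lemma pvCond_reg (docs : List (List (String × String))) :
    decide ("regulatory" ∈ docs.map pvLabelOf)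
      = (docs.map pvSourceOf).any (fun s => pvHits s pvREG && !pvHits s pvHI && !pvHits s pvPR && !PySem.Str.isIn "cochrane" s) := by
  rw [pvMem_label]; congr 1; funext s; exact pvLab_reg s

lemma pvCond_count (docs : List (List (String × String))) :
    PySem.List.count (docs.map pvLabelOf) "high_impact"
      = (docs.map pvSourceOf).countP (fun s => pvHits s pvHI) := by
  rw [PySem.List.count_eq, pvCount_label]; congr 1; funext s; exact pvLab_hi s

-- ===== VERDICT (by name: the statement is the Claim_ definition above) =====
theorem classify_evidence_level_py_spec : Claim_equal_classify_evidence_level_py := by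
  intro docs _ _
  unfold Spec_classify_evidence_level_py classify_evidence_level_py classify_evidence_level_py_alt
  by_cases hnil : docs = []
  · simp [hnil]
  · have eS : ("systematic_review" ∈ docs.map pvLabelOf)
        = ((docs.map pvSourceOf).any (fun s => PySem.Str.isIn "cochrane" s && !pvHits s pvHI && !pvHits s pvPR) = true) := by
      rw [← pvCond_sys docs, decide_eq_true_eq]
    have eP : ("peer_reviewed" ∈ docs.map pvLabelOf)
        = ((docs.map pvSourceOf).any (fun s => pvHits s pvPR && !pvHits s pvHI) = true) := by
      rw [← pvCond_pr docs, decide_eq_true_eq]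
    have eR : ("regulatory" ∈ docs.map pvLabelOf)
        = ((docs.map pvSourceOf).any (fun s => pvHits s pvREG && !pvHits s pvHI && !pvHits s pvPR && !PySem.Str.isIn "cochrane" s) = true) := by
      rw [← pvCond_reg docs, decide_eq_true_eq]
    simp only [hnil, if_false, pvA_list_eq_map, eS, eP, eR, pvCond_count docs]
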